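-- pv_equiv track=rewrite | github.com/athnlp/athnlp-labs | athnlp/readers/token_indexers/bert_squad_indexer.py | _get_nested_wordpiece_tokens
-- ===== SOURCE A (Python) =====
-- from typing import List, Dict
--
-- def _get_nested_wordpiece_tokens(flat_wordpiece_tokens: List[str]):
--     nested_worpiece_tokens = []
--     nested = []
--     for wordpiece in flat_wordpiece_tokens:
--         if wordpiece.startswith("##"):
--             nested.append(wordpiece)
--         else:
--             nested = [wordpiece]
--             nested_worpiece_tokens.append(nested)
--     return nested_worpiece_tokens
-- ===== SOURCE B (Python) =====
-- from typing import List, Dict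
--
-- def _get_nested_wordpiece_tokens(flat_wordpiece_tokens: List[str]):
--     n = len(flat_wordpiece_tokens)
--     starts = [i for i, w in enumerate(flat_wordpiece_tokens) if not w.startswith("##")]
--     return [flat_wordpiece_tokens[s:e] for s, e in zip(starts, starts[1:] + [n])]
-- ===== Notes on version B (the rewrite author's own statement) =====
-- stated objective: alternative
-- what changed: Replaces the single stateful loop that mutates a shared 'current group' list with a two-pass boundary-index approach: first collect the indices of tokens not starting with '##', then emit one slice per consecutive pair of boundary indices.
import Mathlib
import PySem

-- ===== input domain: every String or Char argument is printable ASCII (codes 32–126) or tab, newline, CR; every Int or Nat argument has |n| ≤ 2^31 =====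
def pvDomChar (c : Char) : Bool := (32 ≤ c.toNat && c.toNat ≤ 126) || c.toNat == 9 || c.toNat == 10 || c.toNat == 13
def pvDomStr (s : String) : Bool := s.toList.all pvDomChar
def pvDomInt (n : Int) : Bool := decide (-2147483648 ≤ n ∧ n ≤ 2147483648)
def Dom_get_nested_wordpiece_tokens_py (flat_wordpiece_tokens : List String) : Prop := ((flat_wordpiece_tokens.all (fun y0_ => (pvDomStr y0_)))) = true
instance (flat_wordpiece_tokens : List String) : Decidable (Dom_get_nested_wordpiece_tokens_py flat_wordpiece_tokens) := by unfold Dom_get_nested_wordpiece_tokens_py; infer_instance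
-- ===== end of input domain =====

-- B replaces A's single stateful loop (mutating a shared current-group list) by a two-pass
-- boundary-index decomposition: collect boundary indices, then slice between consecutive ones. Same cost.


-- ===== PORT A =====
-- Python appends the list `nested` into the result by reference and keeps mutating it in place;
-- modelled exactly by the state (completed groups, current group, whether the current group is in the result).
def pyA_step (st : List (List String) × List String × Bool) (w : String) :
    List (List String) × List String × Bool :=
  if PySem.Str.startswith w "##" then (st.1, st.2.1 ++ [w], st.2.2)
  else (st.1 ++ (if st.2.2 then [st.2.1] else []), [w], true)

def get_nested_wordpiece_tokens_py (flat_wordpiece_tokens : List String) : List (List String) :=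
  let st := flat_wordpiece_tokens.foldl pyA_step ([], [], false)
  st.1 ++ (if st.2.2 then [st.2.1] else [])

-- ===== PORT B =====
def get_nested_wordpiece_tokens_py_alt (flat_wordpiece_tokens : List String) : List (List String) :=
  let n : Int := flat_wordpiece_tokens.length
  let starts : List Int :=
    ((PySem.List.enumerate flat_wordpiece_tokens 0).filter
      (fun p => !(PySem.Str.startswith p.2 "##"))).map (fun p => p.1)
  (starts.zip (starts.tail ++ [n])).map
    (fun p => PySem.List.slice flat_wordpiece_tokens (some p.1) (some p.2))

-- ===== PRECONDITION & SPEC =====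
def Spec_get_nested_wordpiece_tokens_py (flat_wordpiece_tokens : List String) (out : List (List String)) : Prop := out = get_nested_wordpiece_tokens_py_alt flat_wordpiece_tokens
instance (flat_wordpiece_tokens : List String) (out : List (List String)) : Decidable (Spec_get_nested_wordpiece_tokens_py flat_wordpiece_tokens out) := by unfold Spec_get_nested_wordpiece_tokens_py; infer_instance

-- ===== CLAIM (what is proved, stated in full; the proofs are below) =====
def Claim_equal_get_nested_wordpiece_tokens_py : Prop := ∀ (flat_wordpiece_tokens : List String), Dom_get_nested_wordpiece_tokens_py flat_wordpiece_tokens → Spec_get_nested_wordpiece_tokens_py flat_wordpiece_tokens (get_nested_wordpiece_tokens_py flat_wordpiece_tokens)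

-- ===== LEMMAS AND PROOFS =====

def contW (w : String) : Bool := PySem.Str.startswith w "##"

-- the common reference function: group by '##'-continuation, dropping a leading '##'-run
def chunk : List String → List (List String)
  | [] => []
  | w :: ws =>
    if contW w then chunk ws
    else (w :: ws.takeWhile contW) :: chunk (ws.dropWhile contW)
termination_by xs => xs.length
decreasing_by
  · simp
  · simpa using Nat.lt_succ_of_le (List.length_dropWhile_le _ _)

lemma chunk_nil : chunk [] = [] := by rw [chunk]

lemma chunk_cons (x : String) (xs : List String) :
    chunk (x :: xs) =
      if contW x then chunk xs
      else (x :: xs.takeWhile contW) :: chunk (xs.dropWhile contW) := by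
  rw [chunk]

def startsOf (o : Int) (xs : List String) : List Int :=
  ((PySem.List.enumerate xs o).filter (fun p => !(PySem.Str.startswith p.2 "##"))).map (fun p => p.1)

lemma startsOf_cons' (x : String) (xs : List String) (o : Int) :
    startsOf o (x :: xs) =
      if contW x then startsOf (o + 1) xs else o :: startsOf (o + 1) xs := by
  cases h : PySem.Chars.startswith x.toList ['#', '#'] <;>
    simp [startsOf, PySem.List.enumerate_cons, contW, h]

lemma startsOf_shift (xs : List String) (o : Int) :
    startsOf o xs = (startsOf 0 xs).map (· + o) := by
  induction xs generalizing o with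
  | nil => simp [startsOf]
  | cons x xs ih =>
    rw [startsOf_cons', startsOf_cons', ih (o + 1), ih (0 + 1)]
    have hmap : ((startsOf 0 xs).map (· + (0 + 1))).map (· + o)
        = (startsOf 0 xs).map (· + (o + 1)) := by
      rw [List.map_map]
      exact List.map_congr_left (fun s _ => by simp [Function.comp]; omega)
    by_cases h : contW x
    · rw [if_pos h, if_pos h, hmap]
    · rw [if_neg h, if_neg h, List.map_cons, hmap]
      norm_num

lemma startsOf_cons (x : String) (xs : List String) :
    startsOf 0 (x :: xs) =
      if contW x then (startsOf 0 xs).map (· + 1) else 0 :: (startsOf 0 xs).map (· + 1) := by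
  rw [startsOf_cons', startsOf_shift xs (0 + 1)]
  simp

lemma mem_startsOf_nonneg {xs : List String} {s : Int} (h : s ∈ startsOf 0 xs) : 0 ≤ s := by
  simp only [startsOf, List.mem_map, List.mem_filter] at h
  obtain ⟨p, ⟨hp, _⟩, rfl⟩ := h
  rw [PySem.List.mem_enumerate_iff] at hp
  obtain ⟨k, hk, rfl⟩ := hp
  simp

lemma startsOf_nil_all {xs : List String} (h : startsOf 0 xs = []) :
    ∀ w ∈ xs, contW w = true := by
  simp only [startsOf, List.map_eq_nil_iff, List.filter_eq_nil_iff] at h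
  intro w hw
  obtain ⟨k, hk, rfl⟩ := List.mem_iff_getElem.mp hw
  have := h (0 + (k : Int), xs[k]) (by rw [PySem.List.mem_enumerate_iff]; exact ⟨k, hk, rfl⟩)
  simpa [contW] using this

lemma startsOf_head_takeWhile {xs : List String} {s0 : Int} {S' : List Int}
    (h : startsOf 0 xs = s0 :: S') :
    xs.takeWhile contW = xs.take s0.toNat := by
  induction xs generalizing s0 S' with
  | nil => simp [startsOf] at h
  | cons x xs ih =>
    rw [startsOf_cons] at h
    by_cases hx : contW x
    · rw [if_pos hx] at h
      cases hS : startsOf 0 xs with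
      | nil => rw [hS] at h; simp at h
      | cons t0 T' =>
        rw [hS] at h
        simp only [List.map_cons, List.cons.injEq] at h
        obtain ⟨hs0, _⟩ := h
        have ht0 : 0 ≤ t0 := mem_startsOf_nonneg (by rw [hS]; exact List.mem_cons_self ..)
        have hnat : s0.toNat = t0.toNat + 1 := by omega
        rw [hnat, List.take_succ_cons, List.takeWhile_cons, if_pos hx, ih hS]
    · rw [if_neg hx] at h
      have hs0 : s0 = 0 := by
        have := congrArg List.head? h
        simpa using this.symm
      rw [hs0, List.takeWhile_cons, if_neg hx]
      simp

lemma chunk_dropWhile (xs : List String) : chunk (xs.dropWhile contW) = chunk xs := by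
  induction xs with
  | nil => rfl
  | cons x xs ih =>
    by_cases hx : contW x
    · rw [List.dropWhile_cons, if_pos hx, ih, chunk_cons, if_pos hx]
    · rw [List.dropWhile_cons, if_neg hx]

lemma slice_shift (x : String) (xs : List String) {s e : Int} (hs : 0 ≤ s) (he : 0 ≤ e) :
    PySem.List.slice (x :: xs) (some (s + 1)) (some (e + 1)) = PySem.List.slice xs (some s) (some e) := by
  rw [PySem.List.slice_toNat _ (by omega) (by omega), PySem.List.slice_toNat _ hs he]
  have h1 : (s + 1).toNat = s.toNat + 1 := by omega
  have h2 : (e + 1).toNat = e.toNat + 1 := by omega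
  rw [h1, h2, List.drop_succ_cons, Nat.succ_sub_succ]

def gB (xs : List String) (S : List Int) : List (List String) :=
  (S.zip (S.tail ++ [(xs.length : Int)])).map (fun p => PySem.List.slice xs (some p.1) (some p.2))

lemma alt_eq_gB (xs : List String) :
    get_nested_wordpiece_tokens_py_alt xs = gB xs (startsOf 0 xs) := rfl

lemma gB_shift (x : String) (xs : List String) (S : List Int) (hS : ∀ s ∈ S, 0 ≤ s) :
    gB (x :: xs) (S.map (· + 1)) = gB xs S := by
  cases S with
  | nil => rfl
  | cons s0 S' =>
    unfold gB
    simp only [List.map_cons, List.tail_cons]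
    have hlen : ((x :: xs).length : Int) = ((xs.length : Int)) + 1 := by
      push_cast [List.length_cons]; ring
    rw [hlen]
    have hz : ((s0 + 1) :: S'.map (· + 1)).zip (S'.map (· + 1) ++ [(xs.length : Int) + 1])
        = ((s0 :: S').zip (S' ++ [(xs.length : Int)])).map (Prod.map (· + 1) (· + 1)) := by
      have := List.zip_map (f := fun s : Int => s + 1) (g := fun s : Int => s + 1)
        (l₁ := s0 :: S') (l₂ := S' ++ [(xs.length : Int)])
      simpa using this
    rw [hz, List.map_map]
    refine List.map_congr_left (fun p hp => ?_)
    have hmem := List.of_mem_zip hp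
    have h1 : 0 ≤ p.1 := hS _ hmem.1
    have h2 : 0 ≤ p.2 := by
      rcases List.mem_append.mp hmem.2 with hm | hm
      · exact hS _ (List.mem_cons_of_mem _ hm)
      · rw [List.mem_singleton] at hm
        rw [hm]; positivity
    simpa using slice_shift x xs h1 h2

lemma B_eq_chunk (xs : List String) : get_nested_wordpiece_tokens_py_alt xs = chunk xs := by
  rw [alt_eq_gB]
  induction xs with
  | nil => rw [chunk_nil]; rfl
  | cons x xs ih =>
    rw [startsOf_cons]
    by_cases hx : contW x
    · rw [if_pos hx, gB_shift x xs _ (fun s hs => mem_startsOf_nonneg hs), ih, chunk_cons,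
        if_pos hx]
    · rw [if_neg hx]
      cases hS : startsOf 0 xs with
      | nil =>
        have hall := startsOf_nil_all hS
        show [PySem.List.slice (x :: xs) (some 0) (some ((x :: xs).length : Int))] = chunk (x :: xs)
        rw [PySem.List.slice_toNat _ le_rfl (by positivity)]
        have hdw : xs.dropWhile contW = [] := List.dropWhile_eq_nil_iff.mpr hall
        have htk : xs.takeWhile contW = xs := by
          have hsplit := List.takeWhile_append_dropWhile (p := contW) (l := xs)
          rw [hdw, List.append_nil] at hsplit
          exact hsplit
        rw [chunk_cons, if_neg hx, htk, hdw, chunk_nil]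
        simp
      | cons s0 S' =>
        have hs0 : 0 ≤ s0 := mem_startsOf_nonneg (by rw [hS]; exact List.mem_cons_self ..)
        have hnn : ∀ s ∈ (s0 :: S'), 0 ≤ s := fun s hs =>
          mem_startsOf_nonneg (by rw [hS]; exact hs)
        have hzip : gB (x :: xs) (0 :: (s0 :: S').map (· + 1)) =
            PySem.List.slice (x :: xs) (some 0) (some (s0 + 1)) ::
              gB (x :: xs) ((s0 :: S').map (· + 1)) := by
          unfold gB
          simp only [List.map_cons, List.tail_cons, List.cons_append, List.zip_cons_cons,
            List.map_cons]
        rw [hzip, gB_shift x xs _ hnn, ← hS, ih]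
        rw [PySem.List.slice_toNat _ le_rfl (by omega)]
        have h1 : (s0 + 1).toNat - (0 : Int).toNat = s0.toNat + 1 := by omega
        rw [h1, Int.toNat_zero, List.drop_zero, List.take_succ_cons]
        rw [chunk_cons, if_neg hx, startsOf_head_takeWhile hS, chunk_dropWhile]

lemma A_fold (ws : List String) :
    ∀ (comp : List (List String)) (cur : List String) (b : Bool),
      (ws.foldl pyA_step (comp, cur, b)).1 ++
          (if (ws.foldl pyA_step (comp, cur, b)).2.2
            then [(ws.foldl pyA_step (comp, cur, b)).2.1] else [])
        = comp ++ (if b then (cur ++ ws.takeWhile contW) :: chunk (ws.dropWhile contW)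
                   else chunk ws) := by
  induction ws with
  | nil =>
    intro comp cur b
    cases b <;> simp [chunk_nil]
  | cons w ws ih =>
    intro comp cur b
    by_cases hw : contW w
    · have hwc : PySem.Chars.startswith w.toList ['#', '#'] = true := by
        have h2 := hw; simp [contW] at h2; exact h2
      simp only [List.foldl_cons]
      rw [show pyA_step (comp, cur, b) w = (comp, cur ++ [w], b) by simp [pyA_step, hwc]]
      rw [ih comp (cur ++ [w]) b]
      cases b <;>
        simp [chunk_cons, hw, List.append_assoc]
    · have hwc : PySem.Chars.startswith w.toList ['#', '#'] = false := by
        have h2 := hw; simp [contW] at h2; exact h2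
      simp only [List.foldl_cons]
      rw [show pyA_step (comp, cur, b) w = (comp ++ (if b then [cur] else []), [w], true) by
        simp [pyA_step, hwc]]
      rw [ih (comp ++ (if b then [cur] else [])) [w] true]
      cases b <;>
        simp [chunk_cons, hw, List.append_assoc]

lemma A_eq_chunk (xs : List String) : get_nested_wordpiece_tokens_py xs = chunk xs := by
  have h := A_fold xs [] [] false
  simpa [get_nested_wordpiece_tokens_py] using h

-- ===== VERDICT (by name: the statement is the Claim_ definition above) =====
theorem get_nested_wordpiece_tokens_py_spec : Claim_equal_get_nested_wordpiece_tokens_py := by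
  intro xs _
  show get_nested_wordpiece_tokens_py xs = get_nested_wordpiece_tokens_py_alt xs
  rw [A_eq_chunk, B_eq_chunk]
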